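-- pv_equiv track=rewrite | github.com/shivamgupta077/PasswordCase | mysite/account/encryption.py | strToBlock
-- ===== SOURCE A (Python) =====
-- def charToBinary(c):
--     asci = ord(c)
--     ans = ""
--     while asci > 0:
--         temp = asci % 2
--         ans = chr(int(temp) + 48) + ans
--         asci = asci // 2
--
--     while len(ans) != 8:
--         ans = '0' + ans
--
--     return ans
--
-- def strToBlock(str):
--     ans = []
--
--     i = 0
--     while i < len(str):
--         temp = ""
--         for j in range(8):
--             if i + j >= len(str):
--                 temp += charToBinary("`")  # padding
--             else:
--                 temp += charToBinary(str[i + j])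
--
--         ans.append(temp)
--         i += 8
--
--     return ans
-- ===== SOURCE B (Python) =====
-- def charToBinary(c):
--     asci = ord(c)
--     ans = ""
--     while asci > 0:
--         temp = asci % 2
--         ans = chr(int(temp) + 48) + ans
--         asci = asci // 2
--
--     while len(ans) != 8:
--         ans = '0' + ans
--
--     return ans
--
-- def strToBlock(str):
--     pad = str + '`' * ((-len(str)) % 8)
--     ans = []
--     for i in range(0, len(pad), 8):
--         ans.append(''.join(charToBinary(ch) for ch in pad[i:i+8]))
--     return ans
-- ===== Notes on version B (the rewrite author's own statement) =====
-- stated objective: simpler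
-- what changed: B pads the string with backticks up front to a multiple of 8 and then chunk-and-maps it in uniform 8-character slices, removing A's interleaved per-character bounds check inside the inner loop.
import Mathlib
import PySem

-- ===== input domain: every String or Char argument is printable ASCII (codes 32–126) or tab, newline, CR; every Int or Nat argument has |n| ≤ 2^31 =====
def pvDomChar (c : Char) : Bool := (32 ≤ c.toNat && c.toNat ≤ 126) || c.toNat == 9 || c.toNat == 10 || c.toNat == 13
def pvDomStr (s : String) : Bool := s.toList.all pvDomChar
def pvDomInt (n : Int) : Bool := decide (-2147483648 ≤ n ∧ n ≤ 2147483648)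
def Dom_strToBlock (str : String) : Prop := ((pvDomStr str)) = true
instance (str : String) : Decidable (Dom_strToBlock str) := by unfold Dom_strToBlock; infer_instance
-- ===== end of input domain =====

-- B pads the string up front and chunk-and-maps uniform 8-char slices, instead of A's
-- interleaved per-character bounds check; same cost, simpler loop body.

-- ===== PORT A =====
-- while asci > 0: ans = chr(asci % 2 + 48) + ans; asci = asci // 2   (asci = ord(c) ≥ 0, so Nat)
def cbLoop (asci : Nat) (ans : List Char) : List Char :=
  if asci > 0 then cbLoop (asci / 2) (Char.ofNat (asci % 2 + 48) :: ans) else ans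
termination_by asci
decreasing_by exact Nat.div_lt_self (by omega) (by omega)

-- while len(ans) != 8: ans = '0' + ans.  The guard '< 8' agrees with Python's '!= 8'
-- wherever the Python loop terminates (len(ans) ≤ 8; the Python diverges for len > 8,
-- which no char of code ≤ 255 — in particular none in Dom — can produce).
def padLoop (ans : List Char) : List Char :=
  if ans.length < 8 then padLoop ('0' :: ans) else ans
termination_by 8 - ans.length

def charToBinary (c : Char) : List Char := padLoop (cbLoop c.toNat [])

-- the inner 'for j in range(8)' building temp
def strToBlockInner (cs : List Char) (i : Nat) : List Char :=
  (List.range 8).foldl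
    (fun temp j => temp ++ (if cs.length ≤ i + j then charToBinary '`' else charToBinary (cs.getD (i + j) ' ')))
    []

-- the outer 'while i < len(str)' loop, i stepping by 8
def strToBlockLoop (cs : List Char) (ans : List (List Char)) (i : Nat) : List (List Char) :=
  if i < cs.length then strToBlockLoop cs (ans ++ [strToBlockInner cs i]) (i + 8) else ans
termination_by cs.length - i
decreasing_by omega

def strToBlock (str : String) : List String :=
  (strToBlockLoop str.toList [] 0).map String.ofList

-- ===== PORT B =====
-- 'for i in range(0, len(pad), 8)' over the padded string, slice pad[i:i+8] each step:
-- structural take-8/drop-8 recursion; ''.join(map charToBinary slice) is flatten ∘ map.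
def chunkBlocks (l : List Char) : List (List Char) :=
  match l with
  | [] => []
  | a :: t => ((((a :: t).take 8).map charToBinary).flatten) :: chunkBlocks (t.drop 7)
termination_by l.length
decreasing_by simp

-- pad = str + '`' * ((-len(str)) % 8); Python (-n) % 8 = (8 - n % 8) % 8 for n : Nat
def strToBlock_alt (str : String) : List String :=
  let cs := str.toList
  (chunkBlocks (cs ++ List.replicate ((8 - cs.length % 8) % 8) '`')).map String.ofList

-- ===== PRECONDITION & SPEC =====
def Spec_strToBlock (str : String) (out : List String) : Prop := out = strToBlock_alt str
instance (str : String) (out : List String) : Decidable (Spec_strToBlock str out) := by unfold Spec_strToBlock; infer_instance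

-- ===== CLAIM (what is proved, stated in full; the proofs are below) =====
def Claim_equal_strToBlock : Prop := ∀ (str : String), Dom_strToBlock str → Spec_strToBlock str (strToBlock str)

-- ===== LEMMAS AND PROOFS =====

-- the inner 8-fold equals the flattened map over the padded 8-slice
-- a 'for j in range(m): acc += f(j)' fold is the flattened map
lemma foldl_range_append (m : Nat) (f : Nat → List Char) (s : List Char) :
    (List.range m).foldl (fun t j => t ++ f j) s = s ++ ((List.range m).map f).flatten := by
  induction m generalizing s with
  | zero => simp
  | succ n ih => simp [List.range_succ, ih]

lemma inner_eq_chunk (cs : List Char) (i : Nat) (h : i < cs.length) :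
    strToBlockInner cs i =
      (((cs.drop i ++ List.replicate ((8 - (cs.length - i) % 8) % 8) '`').take 8).map charToBinary).flatten := by
  unfold strToBlockInner
  rw [foldl_range_append]
  simp only [List.nil_append]
  congr 1
  apply List.ext_getElem
  · simp; omega
  · intro j h1 h2
    have hm : (cs.drop i).length = cs.length - i := by simp
    simp only [List.getElem_map, List.getElem_range, List.getElem_take]
    by_cases hc : cs.length ≤ i + j
    · rw [if_pos hc, List.getElem_append_right (by omega)]
      simp
    · rw [if_neg hc, List.getElem_append_left (by omega), List.getElem_drop,
        List.getD_eq_getElem _ _ (by omega)]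

-- one unfolding of the chunk recursion on a nonempty list
lemma chunk_cons (p : List Char) (h : p ≠ []) :
    chunkBlocks p = ((p.take 8).map charToBinary).flatten :: chunkBlocks (p.drop 8) := by
  cases p with
  | nil => exact absurd rfl h
  | cons a t => simp [chunkBlocks]

lemma chunk_step (cs : List Char) (i : Nat) (h : i < cs.length) :
    chunkBlocks (cs.drop i ++ List.replicate ((8 - (cs.length - i) % 8) % 8) '`') =
      strToBlockInner cs i ::
        chunkBlocks (cs.drop (i + 8) ++ List.replicate ((8 - (cs.length - (i + 8)) % 8) % 8) '`') := by
  have hm : (cs.drop i).length = cs.length - i := by simp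
  have hne : cs.drop i ++ List.replicate ((8 - (cs.length - i) % 8) % 8) '`' ≠ [] := by
    apply List.ne_nil_of_length_pos; simp; omega
  rw [chunk_cons _ hne, ← inner_eq_chunk cs i h]
  congr 1
  by_cases h8 : cs.length - i < 8
  · have h1 : (cs.drop i ++ List.replicate ((8 - (cs.length - i) % 8) % 8) '`').length ≤ 8 := by
      simp; omega
    have h3 : cs.length - (i + 8) = 0 := by omega
    rw [List.drop_eq_nil_of_le h1, h3,
      List.drop_eq_nil_of_le (show cs.length ≤ i + 8 by omega)]
    simp
  · rw [List.drop_append_of_le_length (by omega)]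
    have hd : (cs.drop i).drop 8 = cs.drop (i + 8) := by
      rw [List.drop_drop]
    rw [hd, show (8 - (cs.length - i) % 8) % 8 = (8 - (cs.length - (i + 8)) % 8) % 8 by omega]

lemma loop_eq (cs : List Char) (ans : List (List Char)) (i : Nat) :
    strToBlockLoop cs ans i =
      ans ++ chunkBlocks (cs.drop i ++ List.replicate ((8 - (cs.length - i) % 8) % 8) '`') := by
  fun_induction strToBlockLoop cs ans i with
  | case1 ans i h ih =>
      rw [ih, chunk_step cs i h]
      simp
  | case2 ans i h =>
      have hd : cs.drop i = [] := List.drop_eq_nil_of_le (by omega)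
      have hl : cs.length - i = 0 := by omega
      simp [hd, hl, chunkBlocks]

-- ===== VERDICT (by name: the statement is the Claim_ definition above) =====
theorem strToBlock_spec : Claim_equal_strToBlock := by
  intro s _
  unfold Spec_strToBlock strToBlock strToBlock_alt
  rw [loop_eq]
  simp
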